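-- pv_equiv track=rewrite | github.com/VarunPius/PracticeProblems | Challenges/MicrosoftOA/MaxInserts2ObtainStringWithout3Consecutive_a/Solution.py | maxInserts
-- ===== SOURCE A (Python) =====
-- def maxInserts(word):
--     word = "b"+word+"b"
--     idx = [i for i in range(len(word)) if word[i] != "a"]
--     count = 0
--     for i in range(1,len(idx)):
--         diff = idx[i]-idx[i-1]-1
--         if diff >= 3:
--             return -1
--         count+=2-diff
--     return count
-- ===== SOURCE B (Python) =====
-- def maxInserts(word):
--     if "aaa" in word:
--         return -1
--     a = sum(c == 'a' for c in word)
--     return 2 * (len(word) - a + 1) - a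
-- ===== Notes on version B (the rewrite author's own statement) =====
-- stated objective: simpler
-- what changed: Replaces A's padded index-list construction and gap-scanning loop with a native substring test plus a closed-form count 2*(number of non-'a' chars + 1) - (number of 'a' chars).
import Mathlib
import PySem

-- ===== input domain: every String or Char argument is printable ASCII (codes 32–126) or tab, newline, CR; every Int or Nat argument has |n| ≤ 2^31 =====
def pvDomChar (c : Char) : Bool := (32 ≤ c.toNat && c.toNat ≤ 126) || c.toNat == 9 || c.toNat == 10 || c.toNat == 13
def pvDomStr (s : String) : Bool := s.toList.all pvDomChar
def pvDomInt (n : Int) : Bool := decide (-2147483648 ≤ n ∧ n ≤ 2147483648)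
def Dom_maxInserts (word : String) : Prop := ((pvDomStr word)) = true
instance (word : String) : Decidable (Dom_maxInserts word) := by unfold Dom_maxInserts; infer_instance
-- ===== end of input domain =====

-- B replaces A's padded index-list and gap-scanning loop by a substring test plus a closed-form count (simpler).

-- ===== PORT A =====
-- the loop 'for i in range(1, len(idx)): …' with its early return, as structural recursion
-- over that range; every index read is in range, so pyGetD's default is never used
def maxILoop (idx : List Int) : List Int → Int → Int
  | [], count => count
  | i :: is, count =>
    let diff := PySem.List.pyGetD idx i 0 - PySem.List.pyGetD idx (i - 1) 0 - 1
    if diff ≥ 3 then -1 else maxILoop idx is (count + (2 - diff))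

def maxInserts (word : String) : Int :=
  let w : List Char := 'b' :: word.toList ++ ['b']
  let idx : List Int :=
    (PySem.List.pyRange 0 (w.length : Int)).filter (fun i => decide (PySem.List.pyGetD w i ' ' ≠ 'a'))
  maxILoop idx (PySem.List.pyRange 1 (idx.length : Int)) 0

-- ===== PORT B =====
-- sum(c == 'a' for c in word) is the count of the character 'a' in word
def maxInserts_alt (word : String) : Int :=
  if PySem.Str.isIn "aaa" word then -1
  else
    let a : Int := (word.toList.count 'a' : Int)
    2 * (PySem.Str.len word - a + 1) - a

-- ===== PRECONDITION & SPEC =====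
def Spec_maxInserts (word : String) (out : Int) : Prop := out = maxInserts_alt word
instance (word : String) (out : Int) : Decidable (Spec_maxInserts word out) := by unfold Spec_maxInserts; infer_instance

-- ===== CLAIM (what is proved, stated in full; the proofs are below) =====
def Claim_equal_maxInserts : Prop := ∀ (word : String), Dom_maxInserts word → Spec_maxInserts word (maxInserts word)

-- ===== LEMMAS AND PROOFS =====

-- proof-only helpers: the index list A builds, the list of its consecutive gaps,
-- the gap-consuming loop, and the list of maximal 'a'-run lengths (with padding runs)
def idxsC (w : List Char) : List Int :=
  (PySem.List.pyRange 0 (w.length : Int)).filter (fun i => decide (PySem.List.pyGetD w i ' ' ≠ 'a'))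

def gapsOf : List Int → List Int
  | x :: y :: r => (y - x - 1) :: gapsOf (y :: r)
  | _ => []

def gLoop : List Int → Int → Int
  | [], c => c
  | g :: gs, c => if g ≥ 3 then -1 else gLoop gs (c + (2 - g))

def auxRuns : List Char → Nat → List Nat
  | [], r => [r]
  | c :: t, r => if c = 'a' then auxRuns t (r + 1) else r :: auxRuns t 0

def leading (w : List Char) : Nat := (w.takeWhile (· == 'a')).length

lemma idxsC_eq (w : List Char) :
    idxsC w = ((List.range w.length).filter (fun k => decide (w.getD k ' ' ≠ 'a'))).map Int.ofNat := by
  unfold idxsC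
  rw [PySem.List.pyRange_one]
  simp only [sub_zero, Int.toNat_natCast, zero_add]
  rw [List.filter_map]
  congr 1
  apply List.filter_congr
  intro k hk
  simp [Function.comp, PySem.List.pyGetD_natCast]

lemma idxsC_cons (c : Char) (t : List Char) :
    idxsC (c :: t) = (if c = 'a' then [] else [(0 : Int)]) ++ (idxsC t).map (· + 1) := by
  rw [idxsC_eq, idxsC_eq]
  rw [List.length_cons, List.range_succ_eq_map]
  rw [List.filter_cons]
  by_cases h : c = 'a' <;>
    simp [h, List.filter_map, List.map_map, Int.ofNat_eq_natCast] <;>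
    · apply List.map_congr_left
      intro k hk
      simp [Function.comp, Int.ofNat_eq_natCast]

lemma gapsOf_shift (l : List Int) (k : Int) : gapsOf (l.map (· + k)) = gapsOf l := by
  induction l with
  | nil => rfl
  | cons x t ih =>
    cases t with
    | nil => rfl
    | cons y r =>
      simp only [List.map_cons, gapsOf, List.cons.injEq]
      exact ⟨by ring, by simpa using ih⟩

lemma gapsOf_cons_shift (x : Int) (l : List Int) :
    gapsOf (x :: l.map (· + 1)) = gapsOf ((x - 1) :: l) := by
  have := gapsOf_shift ((x - 1) :: l) 1
  simp only [List.map_cons] at this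
  rw [show x - 1 + 1 = x by ring] at this
  exact this

lemma getD_append_add (pre l : List Int) (k : Nat) (d : Int) :
    (pre ++ l).getD (pre.length + k) d = l.getD k d := by
  simp [List.getD, List.getElem?_append_right]

lemma maxILoop_eq_gLoop (rest : List Int) : ∀ (pre : List Int) (x count : Int),
    maxILoop (pre ++ x :: rest) (PySem.List.pyRange ((pre.length : Int) + 1) (((pre ++ x :: rest).length : Int))) count
      = gLoop (gapsOf (x :: rest)) count := by
  induction rest with
  | nil =>
    intro pre x count
    rw [PySem.List.pyRange_one_eq_nil (by simp)]
    rfl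
  | cons y r ih =>
    intro pre x count
    rw [PySem.List.pyRange_one_cons (by simp)]
    show maxILoop _ (_ :: _) _ = _
    have h1 : PySem.List.pyGetD (pre ++ x :: y :: r) ((pre.length : Int) + 1) 0 = y := by
      rw [show ((pre.length : Int) + 1) = ((pre.length + 1 : Nat) : Int) by push_cast; ring,
        PySem.List.pyGetD_natCast]
      exact (getD_append_add pre (x :: y :: r) 1 0).trans (by simp)
    have h0 : PySem.List.pyGetD (pre ++ x :: y :: r) ((pre.length : Int) + 1 - 1) 0 = x := by
      rw [show ((pre.length : Int) + 1 - 1) = ((pre.length : Nat) : Int) by ring,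
        PySem.List.pyGetD_natCast]
      exact (getD_append_add pre (x :: y :: r) 0 0).trans (by simp)
    simp only [maxILoop, h1, h0]
    rw [show gapsOf (x :: y :: r) = (y - x - 1) :: gapsOf (y :: r) from rfl]
    show (if y - x - 1 ≥ 3 then _ else _) = (if y - x - 1 ≥ 3 then _ else gLoop _ _)
    by_cases hd : y - x - 1 ≥ 3
    · simp [hd]
    · rw [if_neg hd, if_neg hd]
      have := ih (pre ++ [x]) y (count + (2 - (y - x - 1)))
      simp only [List.append_assoc, List.cons_append, List.nil_append, List.length_append,
        List.length_cons, List.length_nil] at this ⊢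
      convert this using 3

lemma gapsOf_runs (w : List Char) : ∀ r : Nat,
    gapsOf ((-(r : Int) - 1) :: idxsC (w ++ ['b'])) = (auxRuns w r).map Int.ofNat := by
  induction w with
  | nil =>
    intro r
    have h : idxsC ['b'] = [(0 : Int)] := by decide
    rw [List.nil_append, h]
    simp [gapsOf, auxRuns, Int.ofNat_eq_natCast]
  | cons c t ih =>
    intro r
    rw [List.cons_append, idxsC_cons]
    by_cases h : c = 'a'
    · rw [if_pos h]
      simp only [List.nil_append]
      rw [gapsOf_cons_shift, show -(r : Int) - 1 - 1 = -((r + 1 : Nat) : Int) - 1 by push_cast; ring,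
        ih (r + 1)]
      simp [auxRuns, h]
    · rw [if_neg h]
      simp only [List.cons_append, List.nil_append]
      rw [show gapsOf ((-(r : Int) - 1) :: 0 :: (idxsC (t ++ ['b'])).map (· + 1))
            = ((0 : Int) - (-(r : Int) - 1) - 1) :: gapsOf ((0 : Int) :: (idxsC (t ++ ['b'])).map (· + 1)) from rfl]
      rw [gapsOf_cons_shift, show (0 : Int) - 1 = -((0 : Nat) : Int) - 1 by norm_num, ih 0]
      simp [auxRuns, h]

lemma maxInserts_eq_gLoop (word : String) :
    maxInserts word = gLoop ((auxRuns word.toList 0).map Int.ofNat) 0 := by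
  show maxILoop (idxsC ('b' :: word.toList ++ ['b']))
      (PySem.List.pyRange 1 ((idxsC ('b' :: word.toList ++ ['b'])).length : Int)) 0 = _
  rw [show ('b' :: word.toList ++ ['b']) = 'b' :: (word.toList ++ ['b']) from rfl, idxsC_cons]
  rw [if_neg (by decide)]
  rw [List.cons_append, List.nil_append]
  have := maxILoop_eq_gLoop ((idxsC (word.toList ++ ['b'])).map (· + 1)) [] 0 0
  simp only [List.nil_append, List.length_nil, Nat.cast_zero, zero_add] at this
  rw [this, gapsOf_cons_shift, show (0 : Int) - 1 = -((0 : Nat) : Int) - 1 by norm_num,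
    gapsOf_runs word.toList 0]

lemma gLoop_char (g : List Nat) : ∀ c : Int,
    gLoop (g.map Int.ofNat) c
      = if g.any (fun n => 3 ≤ n) then -1 else c + 2 * g.length - g.sum := by
  induction g with
  | nil => intro c; simp [gLoop]
  | cons n t ih =>
    intro c
    by_cases h : 3 ≤ n
    · simp [gLoop, show (3 : Int) ≤ (n : Int) from by exact_mod_cast h, h]
    · simp only [List.map_cons, gLoop]
      rw [if_neg (by simp [Int.ofNat_eq_natCast]; omega), ih]
      simp only [List.any_cons, h, decide_false, Bool.false_or]
      split_ifs with h2
      · rfl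
      · simp only [Int.ofNat_eq_natCast, List.length_cons, List.sum_cons]
        push_cast
        ring

lemma auxRuns_length (w : List Char) : ∀ r, (auxRuns w r).length = w.countP (fun c => !(c == 'a')) + 1 := by
  induction w with
  | nil => intro r; simp [auxRuns]
  | cons c t ih =>
    intro r
    by_cases h : c = 'a' <;> simp [auxRuns, h, ih]

lemma auxRuns_sum (w : List Char) : ∀ r, (auxRuns w r).sum = w.count 'a' + r := by
  induction w with
  | nil => intro r; simp [auxRuns]
  | cons c t ih =>
    intro r
    by_cases h : c = 'a' <;> simp [auxRuns, h, ih] <;> omega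

lemma replicate_a_prefix_iff (n : Nat) : ∀ w : List Char, List.replicate n 'a' <+: w ↔ n ≤ leading w := by
  induction n with
  | zero => intro w; simp
  | succ n ih =>
    intro w
    cases w with
    | nil => simp [leading, List.replicate_succ]
    | cons c t =>
      by_cases h : c = 'a' <;>
        simp [leading, List.replicate_succ, List.cons_prefix_cons, h, ih t]
      exact fun hc => absurd hc.symm h

lemma prefix_aaa_iff (w : List Char) : ['a','a','a'] <+: w ↔ 3 ≤ leading w := by
  have := replicate_a_prefix_iff 3 w
  simpa using this

lemma auxRuns_any (w : List Char) : ∀ r,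
    (∃ n ∈ auxRuns w r, 3 ≤ n) ↔ (['a','a','a'] <:+: w ∨ 3 ≤ r + leading w) := by
  induction w with
  | nil =>
    intro r
    simp [auxRuns, leading]
  | cons c t ih =>
    intro r
    by_cases h : c = 'a'
    · subst h
      rw [show auxRuns ('a' :: t) r = auxRuns t (r + 1) from by simp [auxRuns], ih (r + 1)]
      have hlead : leading ('a' :: t) = leading t + 1 := by simp [leading]
      have hinf : (['a','a','a'] <:+: 'a' :: t) ↔ (['a','a','a'] <+: 'a' :: t ∨ ['a','a','a'] <:+: t) :=
        List.infix_cons_iff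
      rw [hinf, prefix_aaa_iff ('a' :: t), hlead]
      constructor
      · rintro (hi | hle)
        · exact Or.inl (Or.inr hi)
        · exact Or.inr (by omega)
      · rintro ((hp | hi) | hle)
        · right; omega
        · exact Or.inl hi
        · right; omega
    · rw [show auxRuns (c :: t) r = r :: auxRuns t 0 from by simp [auxRuns, h]]
      have hlead : leading (c :: t) = 0 := by simp [leading, h]
      have hinf : (['a','a','a'] <:+: c :: t) ↔ (['a','a','a'] <+: c :: t ∨ ['a','a','a'] <:+: t) :=
        List.infix_cons_iff
      have hnp : ¬ (['a','a','a'] <+: c :: t) := by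
        rw [List.cons_prefix_cons]; rintro ⟨hc, -⟩; exact h hc.symm
      have h3 : 3 ≤ leading t → ['a','a','a'] <:+: t :=
        fun hl => ((prefix_aaa_iff t).2 hl).isInfix
      simp only [List.mem_cons, hinf, hlead]
      constructor
      · rintro ⟨n, (rfl | hn), h3n⟩
        · right; omega
        · rcases (ih 0).1 ⟨n, hn, h3n⟩ with hi | hl
          · exact Or.inl (Or.inr hi)
          · exact Or.inl (Or.inr (h3 (by omega)))
      · rintro ((hp | hi) | hle)
        · exact absurd hp hnp
        · obtain ⟨n, hn, h3n⟩ := (ih 0).2 (Or.inl hi)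
          exact ⟨n, Or.inr hn, h3n⟩
        · exact ⟨r, Or.inl rfl, by omega⟩

lemma auxRuns_any_zero (w : List Char) :
    ((auxRuns w 0).any (fun n => 3 ≤ n) = true) ↔ ['a','a','a'] <:+: w := by
  rw [List.any_eq_true]
  simp only [decide_eq_true_eq]
  rw [auxRuns_any w 0]
  constructor
  · rintro (hi | hl)
    · exact hi
    · exact ((prefix_aaa_iff w).2 (by omega)).isInfix
  · exact Or.inl

-- ===== VERDICT (by name: the statement is the Claim_ definition above) =====
theorem maxInserts_spec : Claim_equal_maxInserts := by
  intro word _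
  unfold Spec_maxInserts maxInserts_alt
  rw [maxInserts_eq_gLoop, gLoop_char]
  have hsub : PySem.Str.isIn "aaa" word = true ↔ ['a','a','a'] <:+: word.toList := by
    rw [PySem.Str.isIn_iff_infix]
    rfl
  by_cases hin : ['a','a','a'] <:+: word.toList
  · rw [if_pos ((auxRuns_any_zero word.toList).2 hin), if_pos (hsub.2 hin)]
  · rw [if_neg (fun h => hin ((auxRuns_any_zero word.toList).1 h)),
      if_neg (fun h => hin (hsub.1 h))]
    rw [auxRuns_length, auxRuns_sum, PySem.Str.len_eq]
    have hcount : word.toList.countP (fun c => !(c == 'a')) + word.toList.count 'a' = word.toList.length := by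
      have h := List.length_eq_countP_add_countP (p := fun c => !(c == 'a')) (l := word.toList)
      rw [h, List.count]
      congr 1
      apply List.countP_congr
      intro c hc
      simp
    push_cast
    omega
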